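-- pv_equiv track=rewrite | github.com/holisound/leetcode | python/68_fullJustify.py | to_line
-- ===== SOURCE A (Python) =====
-- def to_line(words, maxWidth):
--     if len(words) == 0:
--         raise Exception("Empty words!")
--     width = sum(len(w) for w in words)
--     k = len(words) - 1
--     if width + k > maxWidth:
--         raise Exception("Exceed maxWidth!")
--     rem = maxWidth - width
--     if k > 0:
--         n, m = divmod(rem, k)
--     else:
--         n, m = 0, rem
--     res = ''
--     for w in words:
--         res += w
--         if k > 0:
--             res += ' ' * n
--             k -= 1
--         if m > 0:
--             res += ' '
--             m -= 1
--     while m > 0: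
--         res += ' '
--         m -= 1
--     return res
-- ===== SOURCE B (Python) =====
-- def to_line(words, maxWidth):
--     if len(words) == 0:
--         raise Exception("Empty words!")
--     width = sum(map(len, words))
--     k = len(words) - 1
--     if width + k > maxWidth:
--         raise Exception("Exceed maxWidth!")
--     rem = maxWidth - width
--     if k == 0:
--         return words[0] + ' ' * rem
--     n, m = divmod(rem, k)
--     gaps = [n + 1] * m + [n] * (k - m)
--     return ''.join(w + ' ' * g for w, g in zip(words, gaps)) + words[-1]
-- ===== Notes on version B (the rewrite author's own statement) =====
-- stated objective: simpler
-- what changed: Replaces the loop that threads decrementing k/m counters through string concatenation (plus a trailing while) with a precomputed gap-width table [n+1]*m + [n]*(k-m) joined between the words in one ''.join, and returns the single-word case directly.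
import Mathlib
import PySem

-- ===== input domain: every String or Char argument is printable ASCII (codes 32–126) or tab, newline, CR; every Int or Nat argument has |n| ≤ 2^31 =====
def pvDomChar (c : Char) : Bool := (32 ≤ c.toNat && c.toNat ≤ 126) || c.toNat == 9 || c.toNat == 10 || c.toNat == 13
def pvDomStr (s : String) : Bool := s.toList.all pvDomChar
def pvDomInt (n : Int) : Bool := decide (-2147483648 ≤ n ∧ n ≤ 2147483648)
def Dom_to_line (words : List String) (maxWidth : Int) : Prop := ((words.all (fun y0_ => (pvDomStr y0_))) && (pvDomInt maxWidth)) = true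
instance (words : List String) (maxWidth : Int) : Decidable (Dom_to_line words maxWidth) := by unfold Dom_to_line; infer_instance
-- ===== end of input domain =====

-- B replaces A's loop that threads decrementing k/m counters through repeated
-- concatenation (plus a trailing while) with a precomputed gap-width table
-- joined between the words; objective: simpler.


-- ' ' * c (Python: empty for c ≤ 0)
def pvSpaces (c : Int) : String := String.ofList (List.replicate c.toNat ' ')

-- ===== PORT A =====
-- one iteration of A's `for w in words` loop; state = (res, k, m)
def pvStepA (n : Int) (st : String × Int × Int) (w : String) : String × Int × Int :=
  let res := st.1 ++ w
  let res := if st.2.1 > 0 then res ++ pvSpaces n else res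
  let k := if st.2.1 > 0 then st.2.1 - 1 else st.2.1
  let res := if st.2.2 > 0 then res ++ " " else res
  let m := if st.2.2 > 0 then st.2.2 - 1 else st.2.2
  (res, k, m)

def to_line (words : List String) (maxWidth : Int) : String :=
  if words.length = 0 then ""  -- A raises "Empty words!" here (outside Pre_)
  else
    let width : Int := words.foldl (fun a w => a + PySem.Str.len w) 0
    let k : Int := (words.length : Int) - 1
    if width + k > maxWidth then ""  -- A raises "Exceed maxWidth!" here (outside Pre_)
    else
      let rem := maxWidth - width
      let nm : Int × Int :=
        if k > 0 then (PySem.Int.floordiv rem k, PySem.Int.mod rem k) else (0, rem)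
      let st := words.foldl (pvStepA nm.1) ("", k, nm.2)
      st.1 ++ pvSpaces st.2.2  -- "while m > 0: res += ' '" appends the final m spaces

-- ===== PORT B =====
def to_line_alt (words : List String) (maxWidth : Int) : String :=
  if words.length = 0 then ""  -- B raises "Empty words!" here (outside Pre_)
  else
    let width : Int := words.foldl (fun a w => a + PySem.Str.len w) 0
    let k : Int := (words.length : Int) - 1
    if width + k > maxWidth then ""  -- B raises "Exceed maxWidth!" here (outside Pre_)
    else
      let rem := maxWidth - width
      if k = 0 then words.headD "" ++ pvSpaces rem
      else
        let n := PySem.Int.floordiv rem k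
        let m := PySem.Int.mod rem k
        let gaps := List.replicate m.toNat (n + 1) ++ List.replicate (k - m).toNat n
        PySem.Str.join "" ((words.zip gaps).map (fun wg => wg.1 ++ pvSpaces wg.2)) ++ words.getLastD ""

-- ===== PRECONDITION & SPEC =====
-- Pre_ excludes exactly the inputs on which A raises an Exception: the empty word
-- list ("Empty words!") and lists whose minimal one-space-separated width exceeds
-- maxWidth ("Exceed maxWidth!").
def Pre_to_line (words : List String) (maxWidth : Int) : Prop :=
  words ≠ [] ∧ (words.map PySem.Str.len).sum + ((words.length : Int) - 1) ≤ maxWidth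
instance (words : List String) (maxWidth : Int) : Decidable (Pre_to_line words maxWidth) := by
  unfold Pre_to_line; infer_instance

def pvWitness_to_line : List String × Int := (["ab", "c"], 7)

def Spec_to_line (words : List String) (maxWidth : Int) (out : String) : Prop := out = to_line_alt words maxWidth
instance (words : List String) (maxWidth : Int) (out : String) : Decidable (Spec_to_line words maxWidth out) := by unfold Spec_to_line; infer_instance

-- ===== CLAIM (what is proved, stated in full; the proofs are below) =====
def Claim_equal_to_line : Prop := ∀ (words : List String) (maxWidth : Int), Dom_to_line words maxWidth → Pre_to_line words maxWidth → Spec_to_line words maxWidth (to_line words maxWidth)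

-- ===== LEMMAS AND PROOFS =====

theorem pvSpaces_zero : pvSpaces 0 = "" := by decide

theorem pvSpaces_add_one (n : Nat) : pvSpaces ((n : Int)) ++ " " = pvSpaces ((n : Int) + 1) := by
  have h1 : ((n : Int) + 1).toNat = n + 1 := by omega
  have h2 : ((n : Int)).toNat = n := by omega
  simp only [pvSpaces, h1, h2, List.replicate_succ', String.ofList_append]

theorem pvSpaces_one_add (c : Int) (h : 0 < c) : " " ++ pvSpaces (c - 1) = pvSpaces c := by
  have h1 : c.toNat = (c - 1).toNat + 1 := by omega
  simp only [pvSpaces, h1, List.replicate_succ]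
  rw [show (' ' :: List.replicate (c - 1).toNat ' ')
        = [' '] ++ List.replicate (c - 1).toNat ' ' from rfl, String.ofList_append]

theorem join_empty_nil : PySem.Str.join "" [] = "" := by decide

theorem join_empty_cons (s : String) (l : List String) :
    PySem.Str.join "" (s :: l) = s ++ PySem.Str.join "" l := by
  cases l with
  | nil => simp [PySem.Str.join, PySem.Chars.join, List.intercalate]
  | cons b l => simp [PySem.Str.join, PySem.Chars.join_cons_cons, String.ofList_append]

-- width computed by the ports' foldl equals the map-sum used by Pre_
theorem pvWidth_eq (words : List String) :
    words.foldl (fun a w => a + PySem.Str.len w) 0 = (words.map PySem.Str.len).sum := by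
  rw [← List.foldl_map, List.sum_eq_foldl]

-- the gap-width table, parametrised by list length (Nat view of B's `gaps`)
def pvGaps (len n m : Nat) : List Int :=
  List.replicate m ((n : Int) + 1) ++ List.replicate (len - 1 - m) (n : Int)

-- loop invariant: A's fold over a nonempty list with k = length-1, base gap n and
-- m extra spaces produces exactly B's joined string, with k = m = 0 left over
theorem pvLoopA (n : Nat) :
    ∀ (ws : List String) (res : String) (m : Nat), ws ≠ [] → m + 1 ≤ ws.length →
      ws.foldl (pvStepA (n : Int)) (res, (((ws.length : Int) - 1), (m : Int))) =
        (res ++ PySem.Str.join "" ((ws.zip (pvGaps ws.length n m)).map (fun wg => wg.1 ++ pvSpaces wg.2))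
             ++ ws.getLastD "", (0, 0)) := by
  intro ws
  induction ws with
  | nil => intro res m h _; exact absurd rfl h
  | cons w ws ih =>
    intro res m _ hm
    cases ws with
    | nil =>
      have hm0 : m = 0 := by simpa using hm
      subst hm0
      simp [pvStepA, pvGaps, join_empty_nil]
    | cons w2 ws2 =>
      have hL1 : ((w :: w2 :: ws2).length : Int) - 1 = ((w2 :: ws2).length : Int) := by
        push_cast [List.length_cons]; ring
      have hLpos : (0:Int) < ((w2 :: ws2).length : Int) := by
        exact_mod_cast Nat.succ_pos ws2.length
      rw [List.foldl_cons, hL1]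
      cases m with
      | zero =>
        have hstep : pvStepA (n : Int) (res, (((w2 :: ws2).length : Int), ((0:Nat) : Int))) w
            = (res ++ w ++ pvSpaces (n : Int), (((w2 :: ws2).length : Int) - 1, ((0:Nat) : Int))) := by
          simp [pvStepA]
        rw [hstep, ih (res ++ w ++ pvSpaces (n : Int)) 0 (by simp) (by simp)]
        have hg : pvGaps (w :: w2 :: ws2).length n 0 = (n : Int) :: pvGaps (w2 :: ws2).length n 0 := by
          simp [pvGaps, List.length_cons, List.replicate_succ]
        rw [hg]
        simp [join_empty_cons, String.append_assoc]
      | succ m' =>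
        have hmpos : (0:Int) < ((m' + 1 : Nat) : Int) := by positivity
        have hstep : pvStepA (n : Int) (res, (((w2 :: ws2).length : Int), ((m' + 1 : Nat) : Int))) w
            = (res ++ w ++ pvSpaces ((n : Int) + 1), (((w2 :: ws2).length : Int) - 1, ((m' : Nat) : Int))) := by
          simp only [pvStepA, if_pos hLpos, if_pos hmpos]
          simp only [Prod.mk.injEq]
          exact ⟨by rw [String.append_assoc, pvSpaces_add_one], trivial, by push_cast; ring⟩
        rw [hstep, ih (res ++ w ++ pvSpaces ((n : Int) + 1)) m' (by simp) (by simp at hm ⊢; omega)]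
        have hg : pvGaps (w :: w2 :: ws2).length n (m' + 1)
            = ((n : Int) + 1) :: pvGaps (w2 :: ws2).length n m' := by
          have hc : (w :: w2 :: ws2).length - 1 - (m' + 1) = (w2 :: ws2).length - 1 - m' := by
            simp [List.length_cons]
          rw [pvGaps, pvGaps, hc, List.replicate_succ]; rfl
        rw [hg]
        simp [join_empty_cons, String.append_assoc]

-- ===== VERDICT =====
theorem to_line_spec : Claim_equal_to_line := by
  intro words maxWidth _ hpre
  obtain ⟨hne, hle⟩ := hpre
  have hlen0 : ¬ words.length = 0 := by simpa using hne
  have hex : ¬ ((words.map PySem.Str.len).sum + ((words.length : Int) - 1) > maxWidth) :=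
    not_lt.mpr hle
  unfold Spec_to_line to_line to_line_alt
  simp only [pvWidth_eq, if_neg hlen0, if_neg hex]
  by_cases hk : (words.length : Int) - 1 = 0
  · -- single word: k = 0
    have h1 : words.length = 1 := by omega
    obtain ⟨w, rfl⟩ := List.length_eq_one_iff.mp h1
    rw [if_neg (by omega : ¬ ((([w].length : Int) - 1) > 0)), if_pos hk]
    by_cases hrw : ((w.length : Int)) < maxWidth
    · simp [pvStepA, hrw, String.append_assoc,
        pvSpaces_one_add (maxWidth - (w.length : Int)) (by omega)]
    · simp [pvStepA, hrw]
  · -- several words: k > 0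
    have hkpos : (0:Int) < (words.length : Int) - 1 := by
      have : words.length ≠ 0 := hlen0
      omega
    rw [if_pos hkpos, if_neg hk]
    set rem : Int := maxWidth - (words.map PySem.Str.len).sum with hremdef
    have hremk : (words.length : Int) - 1 ≤ rem := by omega
    have hn0 : 0 ≤ PySem.Int.floordiv rem ((words.length : Int) - 1) := by
      rw [PySem.Int.floordiv_eq_ediv_of_pos hkpos]
      exact Int.ediv_nonneg (by omega) (by omega)
    have hm0 : 0 ≤ PySem.Int.mod rem ((words.length : Int) - 1) :=
      PySem.Int.mod_nonneg _ hkpos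
    have hmk : PySem.Int.mod rem ((words.length : Int) - 1) < (words.length : Int) - 1 :=
      PySem.Int.mod_lt _ hkpos
    set n := PySem.Int.floordiv rem ((words.length : Int) - 1) with hndef
    set m := PySem.Int.mod rem ((words.length : Int) - 1) with hmdef
    have hn : n = ((n.toNat : Nat) : Int) := by omega
    have hm : m = ((m.toNat : Nat) : Int) := by omega
    have hMlen : m.toNat + 1 ≤ words.length := by omega
    rw [hn, hm, pvLoopA n.toNat words "" m.toNat hne hMlen]
    have hgaps : List.replicate (((m.toNat : Nat) : Int)).toNat (((n.toNat : Nat) : Int) + 1)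
          ++ List.replicate ((((words.length : Int) - 1) - ((m.toNat : Nat) : Int)).toNat) ((n.toNat : Nat) : Int)
        = pvGaps words.length n.toNat m.toNat := by
      have e1 : (((m.toNat : Nat) : Int)).toNat = m.toNat := by omega
      have e2 : (((words.length : Int) - 1) - ((m.toNat : Nat) : Int)).toNat
          = words.length - 1 - m.toNat := by omega
      rw [pvGaps, e1, e2]
    rw [hgaps]
    simp [pvSpaces_zero]
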